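-- pv_equiv track=rewrite | github.com/gregoryann/Python-Beginner-Examples | +1500 Python Challenges/Easy/Find the nth Tetrahedral Number.py | tetra
-- ===== SOURCE A (Python) =====
-- def tetra(n):
-- 	arr = []
-- 	last, boost = 1, 2
-- 	for i in range(n):
-- 		arr.append(last)
-- 		last += boost
-- 		boost += 1
-- 	return sum(arr)
-- ===== SOURCE B (Python) =====
-- def tetra(n):
-- 	return n * (n + 1) * (n + 2) // 6
-- ===== Notes on version B (the rewrite author's own statement) =====
-- stated objective: faster
-- what changed: Replaces the O(n) loop that accumulates triangular numbers into a list with the closed form n(n+1)(n+2)//6.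
-- outside the precondition, e.g. on tetra(-3): A returns 0, B returns -1
import Mathlib
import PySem

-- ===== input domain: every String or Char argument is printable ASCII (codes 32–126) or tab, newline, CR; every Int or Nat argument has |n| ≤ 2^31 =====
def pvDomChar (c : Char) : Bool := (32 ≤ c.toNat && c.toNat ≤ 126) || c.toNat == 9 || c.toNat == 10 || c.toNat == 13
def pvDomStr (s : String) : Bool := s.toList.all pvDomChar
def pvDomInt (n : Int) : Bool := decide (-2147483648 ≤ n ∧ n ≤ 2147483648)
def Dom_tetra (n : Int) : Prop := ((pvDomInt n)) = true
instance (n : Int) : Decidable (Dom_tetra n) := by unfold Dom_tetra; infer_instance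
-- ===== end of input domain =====

-- ===== PORT A =====
-- B replaces A's O(n) triangular-number loop with the closed form n(n+1)(n+2)//6 (objective: faster).
def tetra (n : Int) : Int :=
  let s := (PySem.List.pyRange 0 n 1).foldl
    (fun (st : List Int × Int × Int) _ =>
      (st.1 ++ [st.2.1], st.2.1 + st.2.2, st.2.2 + 1)) ([], 1, 2)
  s.1.sum

-- ===== PORT B =====
def tetra_alt (n : Int) : Int := PySem.Int.floordiv (n * (n + 1) * (n + 2)) 6

-- ===== PRECONDITION & SPEC =====
-- Pre_ excludes negative n, outside the function's natural domain, where A's empty loop and B's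
-- closed form are both defensible choices and return different values (see claim.json cites).
def Pre_tetra (n : Int) : Prop := 0 ≤ n
instance (n : Int) : Decidable (Pre_tetra n) := by unfold Pre_tetra; infer_instance
def pvWitness_tetra : Int := 5
def Spec_tetra (n : Int) (out : Int) : Prop := out = tetra_alt n
instance (n : Int) (out : Int) : Decidable (Spec_tetra n out) := by unfold Spec_tetra; infer_instance

-- ===== CLAIM (what is proved, stated in full; the proofs are below) =====
def Claim_equal_tetra : Prop := ∀ (n : Int), Dom_tetra n → Pre_tetra n → Spec_tetra n (tetra n)

-- ===== LEMMAS AND PROOFS =====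

-- the loop body ignores the loop variable, so folding is iterating length-many times
theorem foldl_const_iterate {α β : Type} (g : α → α) (l : List β) (st : α) :
    l.foldl (fun a _ => g a) st = g^[l.length] st := by
  induction l generalizing st with
  | nil => rfl
  | cons x xs ih => simp [List.foldl, ih, Function.iterate_succ_apply]

def tetraStep (st : List Int × Int × Int) : List Int × Int × Int :=
  (st.1 ++ [st.2.1], st.2.1 + st.2.2, st.2.2 + 1)

theorem tetra_invariant (m : Nat) :
    ∃ (arr : List Int) (last : Int),
      tetraStep^[m] ([], 1, 2) = (arr, last, (m : Int) + 2) ∧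
      last * 2 = ((m : Int) + 1) * ((m : Int) + 2) ∧
      arr.sum * 6 = (m : Int) * ((m : Int) + 1) * ((m : Int) + 2) := by
  induction m with
  | zero => exact ⟨[], 1, by simp [Function.iterate_zero], by norm_num, by simp⟩
  | succ k ih =>
    obtain ⟨arr, last, heq, hlast, hsum⟩ := ih
    refine ⟨arr ++ [last], last + ((k : Int) + 2), ?_, ?_, ?_⟩
    · rw [Function.iterate_succ_apply', heq]
      simp only [tetraStep]
      push_cast
      ring_nf
    · push_cast
      linear_combination hlast
    · rw [List.sum_append, List.sum_singleton]
      push_cast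
      linear_combination hsum + 3 * hlast

-- ===== VERDICT (by name: the statement is the Claim_ definition above) =====
theorem tetra_spec : Claim_equal_tetra := by
  intro n _ hpre
  unfold Spec_tetra tetra tetra_alt
  obtain ⟨m, rfl⟩ := Int.eq_ofNat_of_zero_le hpre
  have hfun : (fun (st : List Int × Int × Int) (_ : Int) =>
      (st.1 ++ [st.2.1], st.2.1 + st.2.2, st.2.2 + 1)) = (fun a _ => tetraStep a) := rfl
  rw [hfun, foldl_const_iterate (g := tetraStep)]
  have hlen : (PySem.List.pyRange 0 (m : Int) 1).length = m := by
    simp [PySem.List.length_pyRange_one]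
  rw [hlen]
  obtain ⟨arr, last, heq, hlast, hsum⟩ := tetra_invariant m
  rw [heq]
  have h6 : (m : Int) * ((m : Int) + 1) * ((m : Int) + 2) = 6 * arr.sum := by linarith
  rw [PySem.Int.floordiv, h6, Int.mul_fdiv_cancel_left _ (by norm_num)]
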